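-- pv_equiv track=rewrite | github.com/RoseaneC/NA-MESA-IA | app/api/webhook.py | _split_captured
-- ===== SOURCE A (Python) =====
-- from typing import Dict, List, Optional, Tuple
--
-- def _split_captured(numero: str, captured: List[Dict[str, str]]) -> Tuple[Optional[str], List[Dict[str, str]]]:
--     reply: Optional[str] = None
--     outbox: List[Dict[str, str]] = []
--
--     for msg in captured:
--         target = msg.get("to")
--         text = msg.get("text")
--         if not target or not text:
--             continue
--
--         if target == numero and reply is None:
--             reply = text
--         else:
--             outbox.append({"to": target, "text": text})
--
--     return reply, outbox
-- ===== SOURCE B (Python) =====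
-- from typing import Dict, List, Optional, Tuple
--
-- def _split_captured(numero: str, captured: List[Dict[str, str]]) -> Tuple[Optional[str], List[Dict[str, str]]]:
--     # Two-phase: filter the valid (to, text) pairs first, then locate the one
--     # consumed as the reply by index and splice it out of the outbox.
--     valid = [(m.get("to"), m.get("text")) for m in captured if m.get("to") and m.get("text")]
--     i = next((j for j, p in enumerate(valid) if p[0] == numero), None)
--     if i is None:
--         reply, rest = None, valid
--     else:
--         reply, rest = valid[i][1], valid[:i] + valid[i + 1:]
--     return reply, [{"to": t, "text": x} for (t, x) in rest]
-- ===== Notes on version B (the rewrite author's own statement) =====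
-- stated objective: alternative
-- what changed: Replaces A's single stateful loop (mutable reply + outbox accumulator) by a three-phase decomposition: filter the valid (to,text) pairs, find the index of the first pair addressed to numero, and build the outbox by splicing that one pair out with slices.
import Mathlib
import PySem

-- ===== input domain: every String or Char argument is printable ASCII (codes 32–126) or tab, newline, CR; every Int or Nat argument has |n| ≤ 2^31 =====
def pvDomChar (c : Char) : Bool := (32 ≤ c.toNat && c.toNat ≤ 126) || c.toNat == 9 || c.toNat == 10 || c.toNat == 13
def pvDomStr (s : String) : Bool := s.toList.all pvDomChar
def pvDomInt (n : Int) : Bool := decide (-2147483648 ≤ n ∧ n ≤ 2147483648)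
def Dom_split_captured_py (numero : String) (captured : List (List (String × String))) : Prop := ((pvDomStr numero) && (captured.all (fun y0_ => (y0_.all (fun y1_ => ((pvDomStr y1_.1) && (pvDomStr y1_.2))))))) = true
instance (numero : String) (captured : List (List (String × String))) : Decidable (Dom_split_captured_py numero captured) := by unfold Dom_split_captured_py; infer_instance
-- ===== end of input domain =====

-- B replaces A's single stateful loop by filter + first-match index + slice; objective: alternative decomposition.
-- ===== PORT A =====
def split_captured_py (numero : String) (captured : List (List (String × String))) :
    Option String × (List (List (String × String))) :=
  captured.foldl (fun st msg =>
    let target := (PySem.Dict.mk msg).get? "to"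
    let text := (PySem.Dict.mk msg).get? "text"
    match target, text with
    | some t, some x =>
      if t = "" ∨ x = "" then st
      else if t = numero ∧ st.1 = none then (some x, st.2)
      else (st.1, st.2 ++ [[("to", t), ("text", x)]])
    | _, _ => st) (none, [])

-- ===== PORT B =====
-- valid = the (to, text) pairs of the messages carrying both keys non-empty
def pvValidOf (captured : List (List (String × String))) : List (String × String) :=
  captured.filterMap (fun m =>
    ((PySem.Dict.mk m).get? "to").bind fun t =>
      ((PySem.Dict.mk m).get? "text").bind fun x =>
        if t ≠ "" ∧ x ≠ "" then some (t, x) else none)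

def split_captured_py_alt (numero : String) (captured : List (List (String × String))) :
    Option String × (List (List (String × String))) :=
  let valid := pvValidOf captured
  -- i = first index whose 'to' equals numero (None if absent)
  let res : Option String × List (String × String) :=
    match valid.findIdx? (fun p => p.1 == numero) with
    | none => (none, valid)
    | some i => (valid[i]?.map Prod.snd,
        PySem.List.slice valid none (some (i : Int)) ++ PySem.List.slice valid (some ((i : Int) + 1)) none)
  (res.1, res.2.map (fun p => [("to", p.1), ("text", p.2)]))
-- ===== PRECONDITION & SPEC =====
def Spec_split_captured_py (numero : String) (captured : List (List (String × String))) (out : Option String × (List (List (String × String)))) : Prop := out = split_captured_py_alt numero captured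
instance (numero : String) (captured : List (List (String × String))) (out : Option String × (List (List (String × String)))) : Decidable (Spec_split_captured_py numero captured out) := by unfold Spec_split_captured_py; infer_instance

-- ===== CLAIM (what is proved, stated in full; the proofs are below) =====
def Claim_equal_split_captured_py : Prop := ∀ (numero : String) (captured : List (List (String × String))), Dom_split_captured_py numero captured → Spec_split_captured_py numero captured (split_captured_py numero captured)

-- ===== LEMMAS AND PROOFS =====

-- proof helpers: A's loop body restricted to the valid (to, text) pairs, and B's output dict builder
def pvPairStep (numero : String)
    (st : Option String × List (List (String × String))) (p : String × String) :
    Option String × List (List (String × String)) :=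
  if p.1 = numero ∧ st.1 = none then (some p.2, st.2)
  else (st.1, st.2 ++ [[("to", p.1), ("text", p.2)]])

def pvMk (p : String × String) : List (String × String) := [("to", p.1), ("text", p.2)]

theorem pvFold_valid (numero : String) (captured : List (List (String × String)))
    (st : Option String × List (List (String × String))) :
    captured.foldl (fun st msg =>
      let target := (PySem.Dict.mk msg).get? "to"
      let text := (PySem.Dict.mk msg).get? "text"
      match target, text with
      | some t, some x =>
        if t = "" ∨ x = "" then st
        else if t = numero ∧ st.1 = none then (some x, st.2)
        else (st.1, st.2 ++ [[("to", t), ("text", x)]])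
      | _, _ => st) st
    = (pvValidOf captured).foldl (pvPairStep numero) st := by
  induction captured generalizing st with
  | nil => rfl
  | cons m rest ih =>
    simp only [List.foldl_cons, pvValidOf, List.filterMap_cons]
    cases hT : (PySem.Dict.mk m).get? "to" with
    | none => simpa [hT, pvValidOf] using ih st
    | some t =>
      cases hX : (PySem.Dict.mk m).get? "text" with
      | none => simpa [hT, hX, pvValidOf] using ih st
      | some x =>
        by_cases h : t = "" ∨ x = ""
        · have h' : ¬ (t ≠ "" ∧ x ≠ "") := by tauto
          simpa [hT, hX, h, h', pvValidOf] using ih st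
        · have h' : t ≠ "" ∧ x ≠ "" := by tauto
          simp only [hT, hX, h, if_pos h', List.foldl_cons, h'.1, h'.2, Option.bind_some,
            ite_false, not_false_iff, and_self, ite_true]
          by_cases hc : t = numero ∧ st.1 = none
          · simpa [hT, hX, h', pvValidOf, pvPairStep, hc] using ih (some x, st.2)
          · simpa [hT, hX, h', pvValidOf, pvPairStep, hc]
              using ih (st.1, st.2 ++ [[("to", t), ("text", x)]])

theorem pvFold_some (numero r : String) (l : List (String × String))
    (ob : List (List (String × String))) :
    l.foldl (pvPairStep numero) (some r, ob) = (some r, ob ++ l.map pvMk) := by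
  induction l generalizing ob with
  | nil => simp
  | cons p tl ih =>
    simp only [List.foldl_cons, pvPairStep]
    have : ¬ (p.1 = numero ∧ (some r : Option String) = none) := by simp
    simpa [this, pvMk] using ih (ob ++ [pvMk p])

theorem pvFold_none (numero : String) (l : List (String × String))
    (ob : List (List (String × String))) :
    l.foldl (pvPairStep numero) (none, ob)
    = match l.findIdx? (fun p => p.1 == numero) with
      | none => (none, ob ++ l.map pvMk)
      | some i => (l[i]?.map Prod.snd, ob ++ (l.take i ++ l.drop (i + 1)).map pvMk) := by
  induction l generalizing ob with
  | nil => simp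
  | cons p tl ih =>
    by_cases hp : p.1 = numero
    · have h0 : List.findIdx? (fun q => q.1 == numero) (p :: tl) = some 0 := by
        simp [List.findIdx?_cons, hp]
      simp only [List.foldl_cons, pvPairStep, hp, h0]
      simpa using pvFold_some numero p.2 tl ob
    · have h0 : List.findIdx? (fun q => q.1 == numero) (p :: tl)
          = (List.findIdx? (fun q => q.1 == numero) tl).map (· + 1) := by
        simp [List.findIdx?_cons, hp]
      simp only [List.foldl_cons, pvPairStep, hp, false_and, ite_false, h0]
      have hfold := ih (ob ++ [pvMk p])
      simp only [pvMk] at hfold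
      rw [hfold]
      cases hF : List.findIdx? (fun q => q.1 == numero) tl with
      | none => simp [pvMk]
      | some i => simp [pvMk, List.take_succ_cons, List.drop_succ_cons]

theorem split_captured_py_eq (numero : String) (captured : List (List (String × String))) :
    split_captured_py numero captured = split_captured_py_alt numero captured := by
  unfold split_captured_py split_captured_py_alt
  rw [pvFold_valid numero captured (none, []), pvFold_none]
  cases hF : (pvValidOf captured).findIdx? (fun p => p.1 == numero) with
  | none => simp [hF, pvMk]
  | some i =>
    have h1 : PySem.List.slice (pvValidOf captured) none (some (i : Int))
        = (pvValidOf captured).take i := PySem.List.slice_to_natCast _ _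
    have h2 : PySem.List.slice (pvValidOf captured) (some ((i : Int) + 1)) none
        = (pvValidOf captured).drop (i + 1) := by
      have : ((i : Int) + 1) = ((i + 1 : Nat) : Int) := by push_cast; ring
      rw [this, PySem.List.slice_from_natCast]
    simp [hF, h1, h2]
    rfl

-- ===== VERDICT (by name: the statement is the Claim_ definition above) =====
theorem split_captured_py_spec : Claim_equal_split_captured_py := by
  intro numero captured _
  unfold Spec_split_captured_py
  exact split_captured_py_eq numero captured
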